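-- pv_equiv track=rewrite | github.com/HillaryDanan/causal-attention-geometry | experiments/test_counterfactual.py | load_copa_dataset
-- ===== SOURCE A (Python) =====
-- from typing import List, Dict, Tuple
--
-- def load_copa_dataset(n_samples: int = 64) -> List[Tuple[str, str]]:
--     """
--     Load or generate COPA-style counterfactual pairs.
--
--     Returns pairs of (factual, counterfactual) sentences.
--     """
--     # Example COPA-style pairs for testing
--     # In production, load from actual COPA dataset
--     copa_pairs = [
--         ("The glass broke because it fell off the table.",
--          "The glass broke because it was made of plastic."),
--
--         ("She got wet because it was raining.",
--          "She got wet because she wore a raincoat."),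
--
--         ("The plant died because it wasn't watered.",
--          "The plant died because it got too much water."),
--
--         ("He was late because there was traffic.",
--          "He was late because he left early."),
--
--         ("The food spoiled because the power went out.",
--          "The food spoiled because it was in the freezer."),
--
--         ("She smiled because she heard good news.",
--          "She smiled because she heard bad news."),
--
--         ("The computer crashed because of a virus.",
--          "The computer crashed because it was new."),
--
--         ("He studied hard because he wanted to pass.",
--          "He studied hard because he wanted to fail."),
--
--         ("The ice melted because it was hot outside.",
--          "The ice melted because it was frozen solid."),
--
--         ("She apologized because she made a mistake.",
--          "She apologized because she was right."),
--
--         ("The alarm went off because there was smoke.",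
--          "The alarm went off because the batteries died."),
--
--         ("He exercised because he wanted to be healthy.",
--          "He exercised because he wanted to be lazy."),
--
--         ("The meeting was cancelled because the boss was sick.",
--          "The meeting was cancelled because everyone attended."),
--
--         ("She wore a coat because it was cold.",
--          "She wore a coat because it was summer."),
--
--         ("The car stopped because it ran out of gas.",
--          "The car stopped because the tank was full."),
--
--         ("He laughed because the joke was funny.",
--          "He laughed because the joke was serious."),
--     ]
--
--     # Extend dataset to reach required N
--     extended_pairs = []
--     while len(extended_pairs) < n_samples:
--         for pair in copa_pairs:
--             if len(extended_pairs) >= n_samples: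
--                 break
--             extended_pairs.append(pair)
--
--             # Generate variations
--             factual, counter = pair
--
--             # Variation 1: Change tense
--             past_factual = factual.replace("because", "since")
--             past_counter = counter.replace("because", "since")
--             extended_pairs.append((past_factual, past_counter))
--
--             # Variation 2: Add context
--             context_factual = f"Yesterday, {factual.lower()}"
--             context_counter = f"Yesterday, {counter.lower()}"
--             extended_pairs.append((context_factual, context_counter))
--
--             # Variation 3: Different causal marker
--             thus_factual = factual.replace("because", "therefore")
--             thus_counter = counter.replace("because", "therefore")
--             extended_pairs.append((thus_factual, thus_counter))
--
--     return extended_pairs[:n_samples]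
-- ===== SOURCE B (Python) =====
-- from typing import List, Tuple
--
-- _COPA_PAIRS = [
--     ("The glass broke because it fell off the table.",
--      "The glass broke because it was made of plastic."),
--     ("She got wet because it was raining.",
--      "She got wet because she wore a raincoat."),
--     ("The plant died because it wasn't watered.",
--      "The plant died because it got too much water."),
--     ("He was late because there was traffic.",
--      "He was late because he left early."),
--     ("The food spoiled because the power went out.",
--      "The food spoiled because it was in the freezer."),
--     ("She smiled because she heard good news.",
--      "She smiled because she heard bad news."),
--     ("The computer crashed because of a virus.",
--      "The computer crashed because it was new."),
--     ("He studied hard because he wanted to pass.",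
--      "He studied hard because he wanted to fail."),
--     ("The ice melted because it was hot outside.",
--      "The ice melted because it was frozen solid."),
--     ("She apologized because she made a mistake.",
--      "She apologized because she was right."),
--     ("The alarm went off because there was smoke.",
--      "The alarm went off because the batteries died."),
--     ("He exercised because he wanted to be healthy.",
--      "He exercised because he wanted to be lazy."),
--     ("The meeting was cancelled because the boss was sick.",
--      "The meeting was cancelled because everyone attended."),
--     ("She wore a coat because it was cold.",
--      "She wore a coat because it was summer."),
--     ("The car stopped because it ran out of gas.",
--      "The car stopped because the tank was full."),
--     ("He laughed because the joke was funny.",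
--      "He laughed because the joke was serious."),
-- ]
--
--
-- def _variant(pair: Tuple[str, str], v: int) -> Tuple[str, str]:
--     """The v-th (0..3) variation of one base pair."""
--     factual, counter = pair
--     if v == 1:
--         return (factual.replace("because", "since"),
--                 counter.replace("because", "since"))
--     if v == 2:
--         return (f"Yesterday, {factual.lower()}", f"Yesterday, {counter.lower()}")
--     if v == 3:
--         return (factual.replace("because", "therefore"),
--                 counter.replace("because", "therefore"))
--     return pair
--
--
-- def load_copa_dataset(n_samples: int = 64) -> List[Tuple[str, str]]:
--     """
--     Load or generate COPA-style counterfactual pairs.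
--
--     Returns pairs of (factual, counterfactual) sentences.
--     """
--     # The i-th sample is determined directly by i: the sequence is periodic
--     # (each base pair contributes four consecutive variants per period).
--     return [_variant(_COPA_PAIRS[(i % 64) // 4], i % 4)
--             for i in range(max(n_samples, 0))]
-- ===== Notes on version B (the rewrite author's own statement) =====
-- stated objective: simpler
-- what changed: Instead of A's extend-a-list-until-long-enough loop with an interleaved break and a final trim, B computes each sample directly from its index in closed form (the output sequence is periodic, so the base pair and the variant kind are index arithmetic), building exactly the requested number of elements with a single comprehension and no intermediate list, cycling or slicing.
import Mathlib
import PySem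

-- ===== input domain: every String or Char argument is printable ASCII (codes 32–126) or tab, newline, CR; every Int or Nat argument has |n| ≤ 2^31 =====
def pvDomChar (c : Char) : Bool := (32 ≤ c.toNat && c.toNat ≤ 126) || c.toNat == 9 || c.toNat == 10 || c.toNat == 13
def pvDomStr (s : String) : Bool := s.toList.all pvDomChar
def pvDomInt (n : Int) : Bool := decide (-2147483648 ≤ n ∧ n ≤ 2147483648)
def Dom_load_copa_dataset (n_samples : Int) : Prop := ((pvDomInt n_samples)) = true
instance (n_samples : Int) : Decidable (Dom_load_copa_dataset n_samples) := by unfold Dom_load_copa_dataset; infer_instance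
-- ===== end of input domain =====

-- B replaces A's extend-and-trim loop by computing the i-th sample directly from its index
-- (the output is periodic, so pair and variant are index arithmetic); objective: simpler.

-- The fixed 16 base pairs (the literal list both Pythons contain).
def copaPairs : List (String × String) := [
  ("The glass broke because it fell off the table.",
   "The glass broke because it was made of plastic."),
  ("She got wet because it was raining.",
   "She got wet because she wore a raincoat."),
  ("The plant died because it wasn't watered.",
   "The plant died because it got too much water."),
  ("He was late because there was traffic.",
   "He was late because he left early."),
  ("The food spoiled because the power went out.",
   "The food spoiled because it was in the freezer."),
  ("She smiled because she heard good news.",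
   "She smiled because she heard bad news."),
  ("The computer crashed because of a virus.",
   "The computer crashed because it was new."),
  ("He studied hard because he wanted to pass.",
   "He studied hard because he wanted to fail."),
  ("The ice melted because it was hot outside.",
   "The ice melted because it was frozen solid."),
  ("She apologized because she made a mistake.",
   "She apologized because she was right."),
  ("The alarm went off because there was smoke.",
   "The alarm went off because the batteries died."),
  ("He exercised because he wanted to be healthy.",
   "He exercised because he wanted to be lazy."),
  ("The meeting was cancelled because the boss was sick.",
   "The meeting was cancelled because everyone attended."),
  ("She wore a coat because it was cold.",
   "She wore a coat because it was summer."),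
  ("The car stopped because it ran out of gas.",
   "The car stopped because the tank was full."),
  ("He laughed because the joke was funny.",
   "He laughed because the joke was serious.")]

-- ===== PORT A =====
-- inner 'for pair in copa_pairs' loop: the break check guards only the base append,
-- then the three variations are appended unconditionally; ported as recursion on the pair list.
def innerA (n : Int) : List (String × String) → List (String × String) → List (String × String)
  | [], extended => extended
  | pair :: rest, extended =>
      if n ≤ (extended.length : Int) then extended   -- Python: if len(extended) >= n_samples: break
      else
        let factual := pair.1
        let counter := pair.2
        let past_factual := PySem.Str.replace factual "because" "since"
        let past_counter := PySem.Str.replace counter "because" "since"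
        let context_factual := "Yesterday, " ++ PySem.Str.lower factual
        let context_counter := "Yesterday, " ++ PySem.Str.lower counter
        let thus_factual := PySem.Str.replace factual "because" "therefore"
        let thus_counter := PySem.Str.replace counter "because" "therefore"
        innerA n rest (extended ++ [pair, (past_factual, past_counter),
          (context_factual, context_counter), (thus_factual, thus_counter)])

-- (termination helpers for the while loop, cited by outerA's decreasing_by)
theorem innerA_len_mono (n : Int) : ∀ (ps acc : List (String × String)),
    acc.length ≤ (innerA n ps acc).length := by
  intro ps
  induction ps with
  | nil => intro acc; simp [innerA]
  | cons p rest ih =>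
      intro acc
      simp only [innerA]
      split
      · exact le_rfl
      · exact le_trans (by simp) (ih _)

theorem innerA_len_grow (n : Int) (acc : List (String × String))
    (h : (acc.length : Int) < n) : acc.length < (innerA n copaPairs acc).length := by
  have h' : ¬ n ≤ (acc.length : Int) := by omega
  obtain ⟨p, rest, hpr⟩ : ∃ p rest, copaPairs = p :: rest := ⟨_, _, rfl⟩
  rw [hpr]
  simp only [innerA, if_neg h']
  exact lt_of_lt_of_le (by simp) (innerA_len_mono n _ _)

-- the 'while len(extended_pairs) < n_samples' loop
def outerA (n : Int) (extended : List (String × String)) : List (String × String) :=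
  if _h : (extended.length : Int) < n then outerA n (innerA n copaPairs extended)
  else extended
termination_by (n - extended.length).toNat
decreasing_by
  have := innerA_len_grow n extended _h
  omega

def load_copa_dataset (n_samples : Int) : List (String × String) :=
  PySem.List.slice (outerA n_samples []) none (some n_samples)   -- extended_pairs[:n_samples]

-- ===== PORT B =====
-- the v-th (0..3) variation of one base pair (Source B's _variant, same if-chain)
def variantB (pair : String × String) (v : Nat) : String × String :=
  let factual := pair.1
  let counter := pair.2
  if v == 1 then
    (PySem.Str.replace factual "because" "since", PySem.Str.replace counter "because" "since")
  else if v == 2 then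
    ("Yesterday, " ++ PySem.Str.lower factual, "Yesterday, " ++ PySem.Str.lower counter)
  else if v == 3 then
    (PySem.Str.replace factual "because" "therefore", PySem.Str.replace counter "because" "therefore")
  else pair

-- the i-th sample; the index (i % 64) / 4 is always < 16, so the indexing never fails
def sampleB (i : Nat) : String × String :=
  variantB (copaPairs.getD ((i % 64) / 4) ("", "")) (i % 4)

def load_copa_dataset_alt (n_samples : Int) : List (String × String) :=
  (List.range (max n_samples 0).toNat).map sampleB

-- ===== PRECONDITION & SPEC =====
def Spec_load_copa_dataset (n_samples : Int) (out : List (String × String)) : Prop := out = load_copa_dataset_alt n_samples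
instance (n_samples : Int) (out : List (String × String)) : Decidable (Spec_load_copa_dataset n_samples out) := by unfold Spec_load_copa_dataset; infer_instance

-- ===== CLAIM (what is proved, stated in full; the proofs are below) =====
def Claim_equal_load_copa_dataset : Prop := ∀ (n_samples : Int), Dom_load_copa_dataset n_samples → Spec_load_copa_dataset n_samples (load_copa_dataset n_samples)

-- ===== LEMMAS AND PROOFS =====

-- the 4-element variation group of one base pair (what A appends per pair)
def copaGroup (pair : String × String) : List (String × String) :=
  let factual := pair.1
  let counter := pair.2
  [pair,
   (PySem.Str.replace factual "because" "since", PySem.Str.replace counter "because" "since"),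
   ("Yesterday, " ++ PySem.Str.lower factual, "Yesterday, " ++ PySem.Str.lower counter),
   (PySem.Str.replace factual "because" "therefore", PySem.Str.replace counter "because" "therefore")]

-- k copies of the 64-element expanded cycle
def cyc (k : Nat) : List (String × String) := (List.replicate k (copaPairs.flatMap copaGroup)).flatten

theorem flat_length : (copaPairs.flatMap copaGroup).length = 64 := by decide

theorem cyc_add (a b : Nat) : cyc (a + b) = cyc a ++ cyc b := by
  unfold cyc
  rw [List.replicate_add, List.flatten_append]

theorem cyc_succ (k : Nat) : cyc (k + 1) = cyc k ++ copaPairs.flatMap copaGroup := by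
  rw [cyc_add]
  simp [cyc]

theorem cyc_length (k : Nat) : (cyc k).length = k * 64 := by
  induction k with
  | zero => simp [cyc]
  | succ k ih => rw [cyc_succ, List.length_append, ih, flat_length]; ring

-- the step of innerA appends exactly copaGroup of the pair
theorem innerA_step2 (n : Int) (p : String × String) (rest acc : List (String × String))
    (h : ¬ n ≤ (acc.length : Int)) :
    innerA n (p :: rest) acc = innerA n rest (acc ++ copaGroup p) := by
  simp only [innerA, if_neg h]
  rfl

theorem innerA_spec (n : Int) : ∀ (ps acc : List (String × String)),
    ∃ i, i ≤ ps.length ∧ innerA n ps acc = acc ++ (ps.take i).flatMap copaGroup ∧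
      (i = ps.length ∨ n ≤ ((acc ++ (ps.take i).flatMap copaGroup).length : Int)) := by
  intro ps
  induction ps with
  | nil => intro acc; exact ⟨0, by simp [innerA]⟩
  | cons p rest ih =>
      intro acc
      by_cases h : n ≤ (acc.length : Int)
      · refine ⟨0, by simp, ?_, Or.inr (by simpa using h)⟩
        simp [innerA, if_pos h]
      · obtain ⟨i, hi, heq, hor⟩ := ih (acc ++ copaGroup p)
        refine ⟨i + 1, by simpa using hi, ?_, ?_⟩
        · rw [innerA_step2 n p rest acc h, heq]
          simp [List.flatMap_cons, List.append_assoc]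
        · rcases hor with h1 | h2
          · exact Or.inl (by simp [h1])
          · refine Or.inr ?_
            simpa [List.flatMap_cons, List.append_assoc] using h2

theorem outerA_spec (n : Int) : ∀ (k : Nat),
    ∃ k' i, i ≤ copaPairs.length ∧
      outerA n (cyc k) = cyc k' ++ (copaPairs.take i).flatMap copaGroup ∧
      n ≤ ((outerA n (cyc k)).length : Int) := by
  intro k
  by_cases hlt : ((cyc k).length : Int) < n
  · -- loop body runs
    obtain ⟨i, hi, heq, hor⟩ := innerA_spec n copaPairs (cyc k)
    by_cases hstop : n ≤ (((cyc k) ++ (copaPairs.take i).flatMap copaGroup).length : Int)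
    · -- inner result already long enough: outer stops after this pass
      have hout : outerA n (cyc k) = cyc k ++ (copaPairs.take i).flatMap copaGroup := by
        rw [outerA, dif_pos hlt, heq, outerA, dif_neg (by omega)]
      exact ⟨k, i, hi, hout, by rw [hout]; exact hstop⟩
    · -- inner completed the whole pair list: continue with one more full cycle
      have hfull : i = copaPairs.length := by tauto
      have hflat : (cyc k) ++ (copaPairs.take i).flatMap copaGroup = cyc (k + 1) := by
        rw [hfull, List.take_length, cyc_succ]
      have hrec : outerA n (cyc k) = outerA n (cyc (k + 1)) := by
        rw [outerA, dif_pos hlt, heq, hflat]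
      obtain ⟨k', i', hi', heq', hlen'⟩ := outerA_spec n (k + 1)
      exact ⟨k', i', hi', by rw [hrec]; exact heq', by rw [hrec]; exact hlen'⟩
  · refine ⟨k, 0, by simp, ?_, by rw [outerA, dif_neg hlt]; omega⟩
    rw [outerA, dif_neg hlt]
    simp
termination_by k => (n - (cyc k).length).toNat
decreasing_by
  have h1 := cyc_length k
  have h2 := cyc_length (k + 1)
  omega

-- take m of a list extended on the right, for m within length, ignores the extension
theorem take_of_prefix {α : Type} (m : Nat) (l t : List α) (h : m ≤ l.length) :
    (l ++ t).take m = l.take m := List.take_append_of_le_length h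

theorem take_cyc_eq (m k1 k2 : Nat) (h1 : m ≤ k1 * 64) (h2 : m ≤ k2 * 64) :
    (cyc k1).take m = (cyc k2).take m := by
  rcases Nat.le_total k1 k2 with h | h
  · obtain ⟨d, rfl⟩ := Nat.le.dest h
    rw [cyc_add, take_of_prefix m _ _ (by rw [cyc_length]; omega)]
  · obtain ⟨d, rfl⟩ := Nat.le.dest h
    rw [cyc_add, take_of_prefix m _ _ (by rw [cyc_length]; omega)]

-- sampleB is 64-periodic
theorem sampleB_periodic (k j : Nat) : sampleB (k * 64 + j) = sampleB j := by
  unfold sampleB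
  have h1 : (k * 64 + j) % 64 = j % 64 := by omega
  have h2 : (k * 64 + j) % 4 = j % 4 := by omega
  rw [h1, h2]

-- one period of B's samples is exactly A's expanded cycle
set_option maxHeartbeats 2000000 in
theorem sampleB_flat : (List.range 64).map sampleB = copaPairs.flatMap copaGroup := by rfl

theorem mapRange_cyc : ∀ (k : Nat), (List.range (k * 64)).map sampleB = cyc k := by
  intro k
  induction k with
  | zero => simp [cyc]
  | succ k ih =>
      have : (k + 1) * 64 = k * 64 + 64 := by ring
      rw [this, List.range_add, List.map_append, ih, cyc_succ, ← sampleB_flat]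
      congr 1
      rw [List.map_map]
      refine List.map_congr_left ?_
      intro j _
      exact sampleB_periodic k j

-- ===== VERDICT (by name: the statement is the Claim_ definition above) =====
theorem load_copa_dataset_spec : Claim_equal_load_copa_dataset := by
  intro n _
  unfold Spec_load_copa_dataset load_copa_dataset load_copa_dataset_alt
  by_cases hn : n ≤ 0
  · -- A's while loop never runs and B's range is empty
    rw [outerA, dif_neg (by simpa using hn)]
    have : (max n 0).toNat = 0 := by omega
    simp [this, PySem.List.slice]
  · have hn0 : (0:Int) ≤ n := by omega
    rw [PySem.List.slice_to _ hn0]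
    -- A's loop result
    obtain ⟨k', i, hi, heq, hlen⟩ := outerA_spec n 0
    have hcyc0 : cyc 0 = ([] : List (String × String)) := by simp [cyc]
    rw [← hcyc0]
    set R := outerA n (cyc 0) with hR
    -- R extends on the right to the full cycle cyc (k'+1)
    have hext : R ++ (copaPairs.drop i).flatMap copaGroup = cyc (k' + 1) := by
      rw [heq, cyc_succ, List.append_assoc, ← List.flatMap_append, List.take_append_drop]
    have hlen2 : R.length + ((copaPairs.drop i).flatMap copaGroup).length = (k' + 1) * 64 := by
      rw [← List.length_append, hext, cyc_length]
    have hA : R.take n.toNat = (cyc (k' + 1)).take n.toNat := by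
      rw [← hext, take_of_prefix _ _ _ (by omega)]
    -- B's list is a take of a sufficiently long cycle
    set K := n.toNat / 64 + 1 with hK
    have hKn : n.toNat ≤ K * 64 := by omega
    have hmax : (max n 0).toNat = n.toNat := by omega
    have hB : (List.range (max n 0).toNat).map sampleB = (cyc K).take n.toNat := by
      have hmin : min n.toNat (K * 64) = n.toNat := Nat.min_eq_left hKn
      rw [hmax, ← mapRange_cyc K, ← List.map_take, List.take_range, hmin]
    rw [hA, hB]
    exact take_cyc_eq n.toNat (k' + 1) K (by omega) hKn
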